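-- pv_equiv track=rewrite | github.com/CoSineZxc/G23_stroke_rehab | RMN_SVM/preprocessing.py | Create_eventlist_labellist
-- ===== SOURCE A (Python) =====
-- def Create_eventlist_labellist(trigger_list,fs):
--     start_label=False
--     eventlist=[]
--     labellist=[]
--     for tri_idx, trigger in enumerate(trigger_list):
--         if trigger==0 and start_label==False:
--             continue
--         elif trigger!=0 and start_label==False:
--             eventlist.append(tri_idx+2*fs)
--             labellist.append(trigger)
--             start_label=True
--         elif trigger!=0 and start_label==True:
--             continue
--         elif trigger==0 and start_label==True:
--             start_label=False
--
--     return eventlist,labellist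
-- ===== SOURCE B (Python) =====
-- def Create_eventlist_labellist(trigger_list, fs):
--     # An event is a rising edge: a nonzero sample whose previous sample is 0
--     # (or which is the first sample).  zip truncates, so [0]+trigger_list
--     # pairs each sample with its predecessor (0 for the first one).
--     pairs = [(i, t)
--              for i, (t, p) in enumerate(zip(trigger_list, [0] + trigger_list))
--              if t != 0 and p == 0]
--     eventlist = [i + 2 * fs for i, _ in pairs]
--     labellist = [t for _, t in pairs]
--     return eventlist, labellist
-- ===== Notes on version B (the rewrite author's own statement) =====
-- stated objective: simpler
-- what changed: Replaces the start_label state machine with stateless rising-edge detection: pair each sample with its predecessor, filter the (nonzero, previous-zero) positions once, then map out the two result lists.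
import Mathlib
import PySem

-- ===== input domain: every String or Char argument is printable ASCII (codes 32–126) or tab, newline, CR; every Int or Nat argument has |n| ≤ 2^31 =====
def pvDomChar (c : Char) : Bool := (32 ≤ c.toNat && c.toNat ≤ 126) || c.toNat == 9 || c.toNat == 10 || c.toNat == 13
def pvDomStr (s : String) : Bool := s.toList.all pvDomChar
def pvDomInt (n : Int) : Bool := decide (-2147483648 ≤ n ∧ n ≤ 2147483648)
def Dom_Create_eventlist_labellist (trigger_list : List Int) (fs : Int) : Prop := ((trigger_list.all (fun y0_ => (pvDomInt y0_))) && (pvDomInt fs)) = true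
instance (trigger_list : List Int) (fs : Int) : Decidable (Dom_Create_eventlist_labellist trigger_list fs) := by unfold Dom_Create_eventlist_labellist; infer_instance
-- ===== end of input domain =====

-- B replaces A's start_label state machine by stateless rising-edge detection
-- (filter positions whose sample is nonzero and predecessor is zero, then map
-- out the two lists); objective: simpler.


-- ===== PORT A =====
-- the for-loop of A as structural recursion over the enumerated list,
-- carrying the state (start_label, eventlist, labellist); branches in A's order
def pvLoopA (fs : Int) : List (Int × Int) → Bool → List Int → List Int → List Int × List Int
  | [], _, ev, lab => (ev, lab)
  | (i, t) :: rest, start, ev, lab =>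
    if t = 0 ∧ start = false then pvLoopA fs rest start ev lab
    else if t ≠ 0 ∧ start = false then pvLoopA fs rest true (ev ++ [i + 2 * fs]) (lab ++ [t])
    else if t ≠ 0 ∧ start = true then pvLoopA fs rest start ev lab
    else pvLoopA fs rest false ev lab

def Create_eventlist_labellist (trigger_list : List Int) (fs : Int) : List Int × List Int :=
  pvLoopA fs (PySem.List.enumerate trigger_list 0) false [] []

-- ===== PORT B =====
-- the (index, value) pairs of the rising edges: value nonzero, predecessor zero
def pvEdgePairs (trigger_list : List Int) : List (Int × Int) :=
  ((PySem.List.enumerate (trigger_list.zip (0 :: trigger_list)) 0).filter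
      (fun q => q.2.1 != 0 && q.2.2 == 0)).map (fun q => (q.1, q.2.1))

def Create_eventlist_labellist_alt (trigger_list : List Int) (fs : Int) : List Int × List Int :=
  ((pvEdgePairs trigger_list).map (fun p => p.1 + 2 * fs),
   (pvEdgePairs trigger_list).map (fun p => p.2))

-- ===== PRECONDITION & SPEC =====
def Spec_Create_eventlist_labellist (trigger_list : List Int) (fs : Int) (out : List Int × List Int) : Prop := out = Create_eventlist_labellist_alt trigger_list fs
instance (trigger_list : List Int) (fs : Int) (out : List Int × List Int) : Decidable (Spec_Create_eventlist_labellist trigger_list fs out) := by unfold Spec_Create_eventlist_labellist; infer_instance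

-- ===== CLAIM (what is proved, stated in full; the proofs are below) =====
def Claim_equal_Create_eventlist_labellist : Prop := ∀ (trigger_list : List Int) (fs : Int), Dom_Create_eventlist_labellist trigger_list fs → Spec_Create_eventlist_labellist trigger_list fs (Create_eventlist_labellist trigger_list fs)

-- ===== LEMMAS AND PROOFS =====

-- common specification both ports are reduced to: recursion carrying the
-- running index s and the previous sample prev
def pvAux (fs : Int) : List Int → Int → Int → List Int × List Int
  | [], _, _ => ([], [])
  | t :: rest, s, prev =>
    let r := pvAux fs rest (s + 1) t
    if t ≠ 0 ∧ prev = 0 then ((s + 2 * fs) :: r.1, t :: r.2) else r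

theorem pvLoopA_eq_aux (fs : Int) : ∀ (ts : List Int) (s prev : Int) (ev lab : List Int),
    pvLoopA fs (PySem.List.enumerate ts s) (decide (prev ≠ 0)) ev lab =
      (ev ++ (pvAux fs ts s prev).1, lab ++ (pvAux fs ts s prev).2) := by
  intro ts
  induction ts with
  | nil => intro s prev ev lab; simp [PySem.List.enumerate_nil, pvLoopA, pvAux]
  | cons t rest ih =>
    intro s prev ev lab
    rw [PySem.List.enumerate_cons]
    by_cases ht : t = 0 <;> by_cases hp : prev = 0
    · simpa [pvLoopA, pvAux, ht, hp] using ih (s + 1) t ev lab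
    · simpa [pvLoopA, pvAux, ht, hp] using ih (s + 1) t ev lab
    · simpa [pvLoopA, pvAux, ht, hp, List.append_assoc] using
        ih (s + 1) t (ev ++ [s + 2 * fs]) (lab ++ [t])
    · simpa [pvLoopA, pvAux, ht, hp] using ih (s + 1) t ev lab

theorem pvEdgePairs_aux (fs : Int) : ∀ (ts : List Int) (s prev : Int),
    ((((PySem.List.enumerate (ts.zip (prev :: ts)) s).filter
        (fun q => q.2.1 != 0 && q.2.2 == 0)).map (fun q => (q.1, q.2.1))).map
          (fun p : Int × Int => p.1 + 2 * fs),
     (((PySem.List.enumerate (ts.zip (prev :: ts)) s).filter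
        (fun q => q.2.1 != 0 && q.2.2 == 0)).map (fun q => (q.1, q.2.1))).map
          (fun p : Int × Int => p.2)) = pvAux fs ts s prev := by
  intro ts
  induction ts with
  | nil => intro s prev; simp [PySem.List.enumerate_nil, pvAux]
  | cons t rest ih =>
    intro s prev
    have hz : (t :: rest).zip (prev :: t :: rest) = (t, prev) :: rest.zip (t :: rest) := rfl
    rw [hz, PySem.List.enumerate_cons]
    by_cases ht : t = 0 <;> by_cases hp : prev = 0 <;>
      simpa [pvAux, ht, hp, Function.comp, Prod.ext_iff] using ih (s + 1) t

-- ===== VERDICT (by name: the statement is the Claim_ definition above) =====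
theorem Create_eventlist_labellist_spec : Claim_equal_Create_eventlist_labellist := by
  intro ts fs _
  unfold Spec_Create_eventlist_labellist Create_eventlist_labellist Create_eventlist_labellist_alt pvEdgePairs
  have h0 : (false : Bool) = decide ((0 : Int) ≠ 0) := by decide
  rw [h0, pvLoopA_eq_aux fs ts 0 0, ← pvEdgePairs_aux fs ts 0 0]
  simp
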